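-- pv_equiv track=rewrite | github.com/duncan-G/StoryBook | apps/screenplay-parser/screenplay_parser.py | _build_character_canon_map
-- ===== SOURCE A (Python) =====
-- from collections import Counter
--
-- def _build_character_canon_map(raw_names: list[str]) -> dict[str, str]:
--     """
--     Build a mapping from every observed character cue to a canonical spelling.
--
--     Groups raw names that become identical when all spaces are removed, then
--     picks the most frequent variant as canonical.  This corrects OCR artifacts
--     like "SA MMIE" → "SAMMIE" while preserving intentional multi-word names.
--     """
--     freq: Counter[str] = Counter(raw_names)
--
--     groups: dict[str, list[str]] = {}
--     for name in freq:
--         key = name.replace(" ", "")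
--         groups.setdefault(key, []).append(name)
--
--     canon: dict[str, str] = {}
--     for key, variants in groups.items():
--         best = max(variants, key=lambda v: freq[v])
--         if len(variants) == 1 and " " in best and freq[best] <= 2:
--             parts = best.split(" ")
--             if (
--                 len(parts) == 2
--                 and all(p.isalpha() for p in parts)
--                 and min(len(parts[0]), len(parts[1])) <= 2
--             ):
--                 best = key
--         for v in variants:
--             canon[v] = best
--     return canon
-- ===== SOURCE B (Python) =====
-- def _build_character_canon_map(raw_names: list[str]) -> dict[str, str]:
--     """Single streaming pass: instead of building a global Counter and then taking a
--     batch max() per group, keep a running per-key argmax while scanning raw_names once.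
--     A name takes over as its key's best the moment its running count exceeds the
--     current best's count (or ties it while having been seen earlier), which at the end
--     of the stream yields exactly the first-seen variant of maximal total frequency."""
--     count: dict[str, int] = {}
--     members: dict[str, list[str]] = {}
--     best: dict[str, str] = {}
--     for name in raw_names:
--         key = name.replace(" ", "")
--         if name not in count:
--             count[name] = 0
--             members.setdefault(key, []).append(name)
--         count[name] += 1
--         g = members[key]
--         b = best.get(key)
--         if b is None or count[name] > count[b] or (
--             count[name] == count[b] and g.index(name) < g.index(b)
--         ):
--             best[key] = name
--     canon: dict[str, str] = {}
--     for key, b in best.items():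
--         g = members[key]
--         if len(g) == 1 and " " in b and count[b] <= 2:
--             parts = b.split(" ")
--             if (
--                 len(parts) == 2
--                 and all(p.isalpha() for p in parts)
--                 and min(len(parts[0]), len(parts[1])) <= 2
--             ):
--                 b = key
--         for v in g:
--             canon[v] = b
--     return canon
-- ===== Notes on version B (the rewrite author's own statement) =====
-- stated objective: alternative
-- what changed: Replaces A's batch pipeline (build a global Counter, then group names into lists, then take max(variants, key=freq) per group) with a single streaming pass that maintains a running per-key argmax: while scanning raw_names once, a name takes over as its key's best the moment its running count beats the current best's (or ties it while being earlier-seen), so no Counter pass and no max() call exist.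
import Mathlib
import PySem

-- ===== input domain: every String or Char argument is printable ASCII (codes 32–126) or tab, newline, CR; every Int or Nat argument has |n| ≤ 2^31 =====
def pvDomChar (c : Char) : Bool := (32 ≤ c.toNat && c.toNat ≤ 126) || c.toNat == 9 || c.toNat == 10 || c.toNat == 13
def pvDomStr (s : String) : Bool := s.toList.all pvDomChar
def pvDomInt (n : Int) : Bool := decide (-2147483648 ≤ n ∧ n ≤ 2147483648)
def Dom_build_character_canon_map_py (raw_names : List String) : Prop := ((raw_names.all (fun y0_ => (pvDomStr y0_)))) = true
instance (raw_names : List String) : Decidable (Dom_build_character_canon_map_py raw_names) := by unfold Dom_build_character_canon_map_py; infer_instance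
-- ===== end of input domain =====

-- B replaces A's batch pipeline (global Counter, grouping dict, per-group max()) with a single
-- streaming pass that maintains a running per-key argmax while scanning raw_names once
-- (objective: alternative; same asymptotic cost).

-- ===== PORT A =====
def build_character_canon_map_py (raw_names : List String) : List (String × String) :=
  let freq : PySem.Dict String Int := PySem.Dict.counter raw_names
  let groups : PySem.Dict String (List String) :=
    (PySem.Dict.keys freq).foldl
      (fun d name => d.modify (PySem.Str.replace name " " "") [] (· ++ [name]))
      PySem.Dict.empty
  let canon : PySem.Dict String String :=
    (PySem.Dict.items groups).foldl
      (fun c kv =>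
        let key := kv.1
        let variants := kv.2
        match PySem.List.max? variants (fun v => freq.getD v 0) with
        | none => c  -- unreachable: every group holds at least one variant
        | some best0 =>
          let best :=
            if variants.length == 1 && PySem.Str.isIn " " best0
                && decide (freq.getD best0 0 ≤ 2) then
              let parts : List String := (PySem.Str.split? best0 " ").getD []  -- sep " " ≠ "": never none
              if parts.length == 2 && parts.all (fun p => PySem.Str.strIsalpha p)
                  && decide (min (PySem.Str.len (parts.getD 0 ""))
                               (PySem.Str.len (parts.getD 1 "")) ≤ 2) then
                key
              else best0
            else best0
          variants.foldl (fun c v => c.insert v best) c)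
      PySem.Dict.empty
  PySem.Dict.items canon

-- ===== PORT B =====
-- one step of Source B's streaming loop: state is (count, members, best)
def cmAltStep
    (st : PySem.Dict String Int × PySem.Dict String (List String) × PySem.Dict String String)
    (name : String) :
    PySem.Dict String Int × PySem.Dict String (List String) × PySem.Dict String String :=
  let key := PySem.Str.replace name " " ""
  let cm :=
    if st.1.contains name then (st.1, st.2.1)
    else (st.1.insert name 0, st.2.1.modify key [] (· ++ [name]))
  let count := cm.1.modify name 0 (· + 1)
  let members := cm.2
  let g := members.getD key []
  let best :=
    match st.2.2.get? key with
    | none => st.2.2.insert key name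
    | some b =>
        -- name and b are both members of g, so index? is some; the getD default is never used
        if count.getD name 0 > count.getD b 0
            ∨ (count.getD name 0 = count.getD b 0
                ∧ (PySem.List.index? g name).getD 0 < (PySem.List.index? g b).getD 0) then
          st.2.2.insert key name
        else st.2.2
  (count, members, best)

def build_character_canon_map_py_alt (raw_names : List String) : List (String × String) :=
  let st := raw_names.foldl cmAltStep (PySem.Dict.empty, PySem.Dict.empty, PySem.Dict.empty)
  let count := st.1
  let members := st.2.1
  let best := st.2.2
  let canon : PySem.Dict String String :=
    best.items.foldl
      (fun c kb =>
        let key := kb.1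
        let b0 := kb.2
        let g := members.getD key []
        let b :=
          if g.length == 1 && PySem.Str.isIn " " b0 && decide (count.getD b0 0 ≤ 2) then
            let parts : List String := (PySem.Str.split? b0 " ").getD []  -- sep " " ≠ "": never none
            if parts.length == 2 && parts.all (fun p => PySem.Str.strIsalpha p)
                && decide (min (PySem.Str.len (parts.getD 0 ""))
                             (PySem.Str.len (parts.getD 1 "")) ≤ 2) then
              key
            else b0
          else b0
        g.foldl (fun c v => c.insert v b) c)
      PySem.Dict.empty
  canon.items

-- ===== PRECONDITION & SPEC =====
def Spec_build_character_canon_map_py (raw_names : List String) (out : List (String × String)) : Prop := out = build_character_canon_map_py_alt raw_names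
instance (raw_names : List String) (out : List (String × String)) : Decidable (Spec_build_character_canon_map_py raw_names out) := by unfold Spec_build_character_canon_map_py; infer_instance

-- ===== CLAIM (what is proved, stated in full; the proofs are below) =====
def Claim_equal_build_character_canon_map_py : Prop := ∀ (raw_names : List String), Dom_build_character_canon_map_py raw_names → Spec_build_character_canon_map_py raw_names (build_character_canon_map_py raw_names)

-- ===== LEMMAS AND PROOFS =====

-- index? of a member is its idxOf
theorem pv_idxOf?_of_mem (g : List String) (v : String) (h : v ∈ g) :
    List.idxOf? v g = some (g.idxOf v) := by
  induction g with
  | nil => cases h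
  | cons a t ih =>
    by_cases hv : v = a
    · subst hv; simp [List.idxOf?_cons, List.idxOf_cons_self]
    · have h' : v ∈ t := by
        cases h with
        | head => exact absurd rfl hv
        | tail _ hh => exact hh
      rw [List.idxOf_cons_ne _ (fun e => hv e.symm)]
      simp [List.idxOf?_cons, beq_false_of_ne (Ne.symm hv), ih h']

theorem pv_max?_snoc_none {V : List String} {f : String → Int} (x : String)
    (hm : PySem.List.max? V f = none) :
    PySem.List.max? (V ++ [x]) f = some x := by
  simp only [PySem.List.max?] at hm ⊢
  rw [List.foldl_append, hm]
  rfl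

theorem pv_max?_snoc_some {V : List String} {f : String → Int} {m : String} (x : String)
    (hm : PySem.List.max? V f = some m) :
    PySem.List.max? (V ++ [x]) f = if f m < f x then some x else some m := by
  simp only [PySem.List.max?] at hm ⊢
  rw [List.foldl_append, hm]
  rfl

theorem pv_max?_congr (V : List String) (f f' : String → Int)
    (h : ∀ y ∈ V, f y = f' y) : PySem.List.max? V f = PySem.List.max? V f' := by
  induction V using List.reverseRecOn with
  | nil => rfl
  | append_singleton V x ih =>
    have ih' := ih (fun y hy => h y (by simp [hy]))
    rcases hm : PySem.List.max? V f' with _ | m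
    · rw [pv_max?_snoc_none x (ih'.trans hm), pv_max?_snoc_none x hm]
    · rw [pv_max?_snoc_some x (ih'.trans hm), pv_max?_snoc_some x hm,
        h x (by simp), h m (by simp [PySem.List.max?_mem hm])]

theorem pv_max?_first {V : List String} {f : String → Int} {b : String}
    (hnd : V.Nodup) (h : PySem.List.max? V f = some b) :
    ∀ y ∈ V, f y < f b ∨ (f y = f b ∧ V.idxOf b ≤ V.idxOf y) := by
  induction V using List.reverseRecOn generalizing b with
  | nil => simp [PySem.List.max?] at h
  | append_singleton V x ih =>
    have hndV : V.Nodup := hnd.of_append_left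
    have hxV : x ∉ V := by
      have := List.disjoint_of_nodup_append hnd
      intro hx; exact this hx (by simp)
    rcases hm : PySem.List.max? V f with _ | m
    · rw [pv_max?_snoc_none x hm] at h
      have hVnil : V = [] := (PySem.List.max?_eq_none_iff _ _).mp hm
      subst hVnil
      obtain rfl : x = b := Option.some.inj h
      intro y hy
      simp only [List.nil_append, List.mem_singleton] at hy
      subst hy; right; exact ⟨rfl, le_refl _⟩
    · rw [pv_max?_snoc_some x hm] at h
      have hmV : m ∈ V := PySem.List.max?_mem hm
      by_cases hlt : f m < f x
      · rw [if_pos hlt] at h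
        obtain rfl : x = b := Option.some.inj h
        intro y hy
        rcases List.mem_append.mp hy with hyV | hyx
        · left
          rcases ih hndV hm y hyV with h1 | ⟨h1, _⟩ <;> omega
        · simp only [List.mem_singleton] at hyx; subst hyx
          right; exact ⟨rfl, le_refl _⟩
      · rw [if_neg hlt] at h
        obtain rfl : m = b := Option.some.inj h
        intro y hy
        rcases List.mem_append.mp hy with hyV | hyx
        · rcases ih hndV hm y hyV with h1 | ⟨h1, h2⟩
          · left; exact h1
          · right
            refine ⟨h1, ?_⟩
            rw [List.idxOf_append_of_mem hmV, List.idxOf_append_of_mem hyV]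
            exact h2
        · simp only [List.mem_singleton] at hyx; subst hyx
          by_cases heq : f y = f m
          · right
            refine ⟨heq, ?_⟩
            rw [List.idxOf_append_of_mem hmV, List.idxOf_append_of_notMem hxV]
            have : V.idxOf m < V.length := List.idxOf_lt_length_of_mem hmV
            omega
          · left; omega

theorem pv_max?_of_first {V : List String} {f : String → Int} {b : String}
    (hnd : V.Nodup) (hb : b ∈ V)
    (h : ∀ y ∈ V, f y < f b ∨ (f y = f b ∧ V.idxOf b ≤ V.idxOf y)) :
    PySem.List.max? V f = some b := by
  rcases hm : PySem.List.max? V f with _ | m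
  · have : V = [] := (PySem.List.max?_eq_none_iff _ _).mp hm
    subst this; cases hb
  · have hmV : m ∈ V := PySem.List.max?_mem hm
    have hbm : f b ≤ f m := PySem.List.max?_isMax hm b hb
    have hchar := pv_max?_first hnd hm
    have heq : m = b := by
      rcases h m hmV with h1 | ⟨h1, h2⟩
      · omega
      · rcases hchar b hb with h3 | ⟨h3, h4⟩
        · omega
        · have : V.idxOf m = V.idxOf b := by omega
          exact (List.idxOf_inj hmV).mp this
    rw [heq]

-- PySem.Set: snoc and map-dedup facts
theorem pv_ofList_append_singleton (l : List String) (x : String) :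
    PySem.Set.ofList (l ++ [x]) = PySem.Set.add (PySem.Set.ofList l) x := by
  simp [PySem.Set.ofList_eq_foldl, List.foldl_append]

theorem pv_add_of_mem {s : List String} {x : String} (h : x ∈ s) :
    PySem.Set.add s x = s := by
  simp [PySem.Set.add, PySem.Set.contains, h]

theorem pv_add_of_not_mem {s : List String} {x : String} (h : x ∉ s) :
    PySem.Set.add s x = s ++ [x] := by
  simp [PySem.Set.add, PySem.Set.contains, h]

theorem pv_ofList_map_ofList (f : String → String) (l : List String) :
    PySem.Set.ofList ((PySem.Set.ofList l).map f) = PySem.Set.ofList (l.map f) := by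
  induction l using List.reverseRecOn with
  | nil => rfl
  | append_singleton l x ih =>
    rw [pv_ofList_append_singleton, List.map_append, List.map_singleton,
      pv_ofList_append_singleton]
    by_cases hx : x ∈ PySem.Set.ofList l
    · rw [pv_add_of_mem hx]
      have hfx : f x ∈ (PySem.Set.ofList l).map f := List.mem_map_of_mem hx
      rw [ih.symm] at *
      rw [pv_add_of_mem (by rw [PySem.Set.mem_ofList]; exact List.mem_map_of_mem hx)]
    · rw [pv_add_of_not_mem hx, List.map_append, List.map_singleton,
        pv_ofList_append_singleton, ih]

-- the streaming-loop invariant of Source B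
def cmInv (done : List String)
    (st : PySem.Dict String Int × PySem.Dict String (List String) × PySem.Dict String String) :
    Prop :=
  (∀ v, st.1.contains v = decide (v ∈ done)) ∧
  (∀ v, st.1.getD v 0 = (done.count v : Int)) ∧
  (∀ k, st.2.1.getD k [] =
      (PySem.Set.ofList done).filter (fun n => PySem.Str.replace n " " "" == k)) ∧
  (st.2.2.keys = PySem.Set.ofList (done.map (fun n => PySem.Str.replace n " " ""))) ∧
  (∀ k, st.2.2.get? k =
      PySem.List.max? ((PySem.Set.ofList done).filter (fun n => PySem.Str.replace n " " "" == k))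
        (fun v => (done.count v : Int)))

theorem cmInv_nil :
    cmInv [] (PySem.Dict.empty, PySem.Dict.empty, PySem.Dict.empty) := by
  refine ⟨?_, ?_, ?_, ?_, ?_⟩ <;>
    simp [PySem.Dict.contains_empty, PySem.Dict.getD_empty, PySem.Dict.keys_empty,
      PySem.Dict.get?_empty, PySem.Set.ofList, PySem.List.max?]

-- count of each name in done ++ [x]
theorem pv_count_snoc (done : List String) (x v : String) :
    (List.count v (done ++ [x]) : Int) = (List.count v done : Int) + (if v = x then 1 else 0) := by
  rw [List.count_append, List.count_singleton]
  by_cases hv : v = x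
  · subst hv; simp
  · rw [if_neg (by simpa using fun e => hv e.symm), if_neg hv]; simp

theorem cmInv_step (done : List String)
    (st : PySem.Dict String Int × PySem.Dict String (List String) × PySem.Dict String String)
    (x : String) (h : cmInv done st) : cmInv (done ++ [x]) (cmAltStep st x) := by
  obtain ⟨hc, hn, hm, hk, hb⟩ := h
  have hbeq : (PySem.Str.replace x " " "" == PySem.Str.replace x " " "") = true := beq_self_eq_true _
  simp only [cmAltStep]
  by_cases hmem : x ∈ done
  · -- x already seen: count/members branch is a no-op, then count bumps
    have hBx : st.1.contains x = true := by rw [hc]; exact decide_eq_true hmem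
    rw [if_pos hBx]
    have hS' : PySem.Set.ofList (done ++ [x]) = PySem.Set.ofList done := by
      rw [pv_ofList_append_singleton, pv_add_of_mem ((PySem.Set.mem_ofList done x).mpr hmem)]
    have hK' : PySem.Set.ofList ((done ++ [x]).map (fun n => PySem.Str.replace n " " ""))
        = PySem.Set.ofList (done.map (fun n => PySem.Str.replace n " " "")) := by
      rw [List.map_append, List.map_singleton, pv_ofList_append_singleton,
        pv_add_of_mem ((PySem.Set.mem_ofList _ _).mpr (List.mem_map_of_mem hmem))]
    have hgx : (st.1.modify x 0 (· + 1)).getD x 0 = (List.count x done : Int) + 1 := by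
      rw [PySem.Dict.getD_modify, if_pos rfl, hn x]
    have hgv : ∀ v : String, v ≠ x → (st.1.modify x 0 (· + 1)).getD v 0 = (List.count v done : Int) := by
      intro v hv; rw [PySem.Dict.getD_modify, if_neg hv, hn v]
    have hconj1 : ∀ v : String, (st.1.modify x 0 (· + 1)).contains v = decide (v ∈ done ++ [x]) := by
      intro v
      rw [PySem.Dict.contains_modify, hc v]
      by_cases hv : v = x <;> simp [hv, hmem]
    have hconj2 : ∀ v : String, (st.1.modify x 0 (· + 1)).getD v 0 = (List.count v (done ++ [x]) : Int) := by
      intro v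
      rw [pv_count_snoc]
      by_cases hv : v = x
      · subst hv; rw [hgx, if_pos rfl]
      · rw [hgv v hv, if_neg hv]; ring
    have hconj3 : ∀ k : String, st.2.1.getD k [] =
        (PySem.Set.ofList (done ++ [x])).filter (fun n => PySem.Str.replace n " " "" == k) := by
      intro k; rw [hS', hm k]
    have hxV : x ∈ (PySem.Set.ofList done).filter
        (fun n => PySem.Str.replace n " " "" == PySem.Str.replace x " " "") :=
      List.mem_filter.mpr ⟨(PySem.Set.mem_ofList _ _).mpr hmem, hbeq⟩
    have hndV : ((PySem.Set.ofList done).filter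
        (fun n => PySem.Str.replace n " " "" == PySem.Str.replace x " " "")).Nodup :=
      (PySem.Set.nodup_ofList done).filter _
    rcases hg : st.2.2.get? (PySem.Str.replace x " " "") with _ | b
    · -- impossible: x's group is nonempty
      exfalso
      rw [hb] at hg
      have := (PySem.List.max?_eq_none_iff _ _).mp hg
      rw [this] at hxV; cases hxV
    · dsimp only
      have hmax : PySem.List.max? ((PySem.Set.ofList done).filter
          (fun n => PySem.Str.replace n " " "" == PySem.Str.replace x " " ""))
          (fun v => (List.count v done : Int)) = some b := by rw [← hb, hg]
      have hbV := PySem.List.max?_mem hmax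
      have hbdone : b ∈ done := (PySem.Set.mem_ofList _ _).mp (List.mem_filter.mp hbV).1
      have hchar := pv_max?_first hndV hmax
      have hidx : ∀ v ∈ (PySem.Set.ofList done).filter
          (fun n => PySem.Str.replace n " " "" == PySem.Str.replace x " " ""),
          (PySem.List.index? (st.2.1.getD (PySem.Str.replace x " " "") []) v).getD 0
            = ((PySem.Set.ofList done).filter
                (fun n => PySem.Str.replace n " " "" == PySem.Str.replace x " " "")).idxOf v := by
        intro v hv
        rw [hm]
        show (List.idxOf? v _).getD 0 = _
        rw [pv_idxOf?_of_mem _ v hv]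
        rfl
      have hcont : st.2.2.contains (PySem.Str.replace x " " "") = true := by
        rw [PySem.Dict.contains_eq_isSome_get?, hg]; rfl
      -- the congruence fact for keys k ≠ key x
      have hcongr : ∀ k : String, k ≠ PySem.Str.replace x " " "" →
          PySem.List.max? ((PySem.Set.ofList done).filter (fun n => PySem.Str.replace n " " "" == k))
            (fun v => (List.count v done : Int))
          = PySem.List.max? ((PySem.Set.ofList done).filter (fun n => PySem.Str.replace n " " "" == k))
            (fun v => (List.count v (done ++ [x]) : Int)) := by
        intro k hkk
        apply pv_max?_congr
        intro y hy
        obtain ⟨hyS, hyk⟩ := List.mem_filter.mp hy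
        have hyx : y ≠ x := by
          intro e
          exact hkk (by rw [← (beq_iff_eq.mp hyk), e])
        rw [pv_count_snoc, if_neg hyx]; ring
      by_cases hbx : b = x
      · -- name is the current best: the tie/beat test is false, best unchanged
        rw [hbx] at hbV hchar hg ⊢
        rw [if_neg (by
          intro hcond
          rcases hcond with h1 | ⟨_, h2⟩
          · exact lt_irrefl _ h1
          · exact lt_irrefl _ h2)]
        refine ⟨hconj1, hconj2, hconj3, by rw [hk, hK'], ?_⟩
        intro k
        rw [hS']
        by_cases hkk : k = PySem.Str.replace x " " ""
        · subst hkk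
          rw [hg]
          symm
          apply pv_max?_of_first hndV hbV
          intro y hy
          rw [pv_count_snoc, pv_count_snoc, if_pos rfl]
          by_cases hyx : y = x
          · subst hyx; rw [if_pos rfl]; right; exact ⟨rfl, le_refl _⟩
          · rw [if_neg hyx]
            rcases hchar y hy with h1 | ⟨h1, _⟩ <;> left <;> omega
        · rw [hb k, hcongr k hkk]
      · -- b ≠ x : evaluate the beat/tie test arithmetically
        have hbxV : b ∈ (PySem.Set.ofList done).filter
            (fun n => PySem.Str.replace n " " "" == PySem.Str.replace x " " "") := hbV
        rw [hgx, hgv b hbx, hidx x hxV, hidx b hbV]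
        have hx := hchar x hxV
        by_cases hC : (List.count x done : Int) + 1 > (List.count b done : Int)
            ∨ ((List.count x done : Int) + 1 = (List.count b done : Int)
                ∧ ((PySem.Set.ofList done).filter
                      (fun n => PySem.Str.replace n " " "" == PySem.Str.replace x " " "")).idxOf x
                  < ((PySem.Set.ofList done).filter
                      (fun n => PySem.Str.replace n " " "" == PySem.Str.replace x " " "")).idxOf b)
        · rw [if_pos hC]
          refine ⟨hconj1, hconj2, hconj3, by rw [PySem.Dict.keys_insert_of_contains _ _ hcont, hk, hK'], ?_⟩
          intro k
          rw [hS']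
          by_cases hkk : k = PySem.Str.replace x " " ""
          · subst hkk
            rw [PySem.Dict.get?_insert, if_pos rfl]
            symm
            apply pv_max?_of_first hndV hxV
            intro y hy
            rw [pv_count_snoc, pv_count_snoc, if_pos rfl]
            by_cases hyx : y = x
            · rw [if_pos hyx, hyx]; right; exact ⟨rfl, le_refl _⟩
            · rw [if_neg hyx]
              rcases hC with h1 | ⟨h1, h2⟩
              · -- strict beat: count x = count b, so new count x beats everything
                rcases hx with hx1 | ⟨hx1, _⟩
                · omega
                · rcases hchar y hy with hy1 | ⟨hy1, _⟩ <;> left <;> omega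
              · -- tie, x earlier than b
                rcases hchar y hy with hy1 | ⟨hy1, hy2⟩
                · left; omega
                · right; constructor
                  · omega
                  · omega
          · rw [PySem.Dict.get?_insert, if_neg hkk, hb k, hcongr k hkk]
        · rw [if_neg hC]
          push Not at hC
          obtain ⟨hC1, hC2⟩ := hC
          refine ⟨hconj1, hconj2, hconj3, by rw [hk, hK'], ?_⟩
          intro k
          rw [hS']
          by_cases hkk : k = PySem.Str.replace x " " ""
          · subst hkk
            rw [hg]
            symm
            apply pv_max?_of_first hndV hbV
            intro y hy
            rw [pv_count_snoc, pv_count_snoc, if_neg hbx]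
            by_cases hyx : y = x
            · rw [if_pos hyx, hyx]
              by_cases heq : (List.count x done : Int) + 1 = (List.count b done : Int)
              · right; exact ⟨by omega, hC2 heq⟩
              · left; omega
            · rw [if_neg hyx]
              rcases hchar y hy with hy1 | ⟨hy1, hy2⟩
              · left; omega
              · right; exact ⟨by omega, hy2⟩
          · rw [hb k, hcongr k hkk]
  · -- x is new: count/first/members all gain x
    have hBx : st.1.contains x = false := by rw [hc]; exact decide_eq_false hmem
    rw [if_neg (by rw [hBx]; exact Bool.false_ne_true)]
    have hxS : x ∉ PySem.Set.ofList done := fun hx => hmem ((PySem.Set.mem_ofList _ _).mp hx)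
    have hS' : PySem.Set.ofList (done ++ [x]) = PySem.Set.ofList done ++ [x] := by
      rw [pv_ofList_append_singleton, pv_add_of_not_mem hxS]
    have hcnt0 : List.count x done = 0 := List.count_eq_zero.mpr hmem
    have hgx : ((st.1.insert x 0).modify x 0 (· + 1)).getD x 0 = 1 := by
      rw [PySem.Dict.getD_modify, if_pos rfl, PySem.Dict.getD_insert, if_pos rfl]
      norm_num
    have hgv : ∀ v : String, v ≠ x →
        ((st.1.insert x 0).modify x 0 (· + 1)).getD v 0 = (List.count v done : Int) := by
      intro v hv
      rw [PySem.Dict.getD_modify, if_neg hv, PySem.Dict.getD_insert, if_neg hv, hn v]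
    have hconj1 : ∀ v : String,
        ((st.1.insert x 0).modify x 0 (· + 1)).contains v = decide (v ∈ done ++ [x]) := by
      intro v
      rw [PySem.Dict.contains_modify, PySem.Dict.contains_insert, hc v]
      by_cases hv : v = x <;> simp [hv, hmem]
    have hconj2 : ∀ v : String,
        ((st.1.insert x 0).modify x 0 (· + 1)).getD v 0 = (List.count v (done ++ [x]) : Int) := by
      intro v
      rw [pv_count_snoc]
      by_cases hv : v = x
      · subst hv; rw [hgx, if_pos rfl, hcnt0]; simp
      · rw [hgv v hv, if_neg hv]; ring
    have hmemb : ∀ k : String,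
        (st.2.1.modify (PySem.Str.replace x " " "") [] (· ++ [x])).getD k [] =
          (PySem.Set.ofList (done ++ [x])).filter (fun n => PySem.Str.replace n " " "" == k) := by
      intro k
      rw [hS', List.filter_append]
      by_cases hkk : k = PySem.Str.replace x " " ""
      · subst hkk
        rw [PySem.Dict.getD_modify, if_pos rfl, hm]
        simp
      · rw [PySem.Dict.getD_modify, if_neg hkk, hm k]
        have : (PySem.Str.replace x " " "" == k) = false :=
          beq_false_of_ne (fun e => hkk e.symm)
        simp [this]
    have hynx : ∀ (k : String) (y : String),
        y ∈ (PySem.Set.ofList done).filter (fun n => PySem.Str.replace n " " "" == k) → y ≠ x := by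
      intro k y hy e
      subst e
      exact hxS (List.mem_filter.mp hy).1
    have hcongr : ∀ k : String,
        PySem.List.max? ((PySem.Set.ofList done).filter (fun n => PySem.Str.replace n " " "" == k))
          (fun v => (List.count v done : Int))
        = PySem.List.max? ((PySem.Set.ofList done).filter (fun n => PySem.Str.replace n " " "" == k))
          (fun v => (List.count v (done ++ [x]) : Int)) := by
      intro k
      apply pv_max?_congr
      intro y hy
      rw [pv_count_snoc, if_neg (hynx k y hy)]; ring
    have hVfilter : ∀ k : String, k ≠ PySem.Str.replace x " " "" →
        (PySem.Set.ofList (done ++ [x])).filter (fun n => PySem.Str.replace n " " "" == k)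
        = (PySem.Set.ofList done).filter (fun n => PySem.Str.replace n " " "" == k) := by
      intro k hkk
      rw [hS', List.filter_append]
      have : (PySem.Str.replace x " " "" == k) = false := beq_false_of_ne (fun e => hkk e.symm)
      simp [this]
    rcases hg : st.2.2.get? (PySem.Str.replace x " " "") with _ | b
    · -- first variant of a brand-new group
      dsimp only
      have hVnil : (PySem.Set.ofList done).filter
          (fun n => PySem.Str.replace n " " "" == PySem.Str.replace x " " "") = [] := by
        rw [hb] at hg
        exact (PySem.List.max?_eq_none_iff _ _).mp hg
      have hncont : st.2.2.contains (PySem.Str.replace x " " "") = false := by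
        rw [PySem.Dict.contains_eq_isSome_get?, hg]; rfl
      refine ⟨hconj1, hconj2, hmemb, ?_, ?_⟩
      · rw [PySem.Dict.keys_insert_of_not_contains _ _ hncont, hk, List.map_append,
          List.map_singleton, pv_ofList_append_singleton,
          pv_add_of_not_mem (fun hx => ((PySem.Dict.get?_eq_none_iff_not_mem_keys _ _).mp hg)
            (by rw [hk]; exact hx))]
      · intro k
        by_cases hkk : k = PySem.Str.replace x " " ""
        · subst hkk
          rw [PySem.Dict.get?_insert, if_pos rfl, hS', List.filter_append, hVnil]
          simp only [List.nil_append]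
          have : List.filter (fun n => PySem.Str.replace n " " "" == PySem.Str.replace x " " "") [x]
              = [x] := by simp
          rw [this]
          rfl
        · rw [PySem.Dict.get?_insert, if_neg hkk, hb k, hcongr k, hVfilter k hkk]
    · -- existing group: new name has count 1 and latest position, best unchanged
      dsimp only
      have hmax : PySem.List.max? ((PySem.Set.ofList done).filter
          (fun n => PySem.Str.replace n " " "" == PySem.Str.replace x " " ""))
          (fun v => (List.count v done : Int)) = some b := by rw [← hb, hg]
      have hbV := PySem.List.max?_mem hmax
      have hbdone : b ∈ done := (PySem.Set.mem_ofList _ _).mp (List.mem_filter.mp hbV).1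
      have hbx : b ≠ x := fun e => hmem (e ▸ hbdone)
      have hndV : ((PySem.Set.ofList done).filter
          (fun n => PySem.Str.replace n " " "" == PySem.Str.replace x " " "")).Nodup :=
        (PySem.Set.nodup_ofList done).filter _
      have hchar := pv_max?_first hndV hmax
      have hxnotV : x ∉ (PySem.Set.ofList done).filter
          (fun n => PySem.Str.replace n " " "" == PySem.Str.replace x " " "") :=
        fun hx => hxS (List.mem_filter.mp hx).1
      have hcount1 : 0 < List.count b done := List.count_pos_iff.mpr hbdone
      -- the new group list
      have hgroup : (st.2.1.modify (PySem.Str.replace x " " "") [] (· ++ [x])).getD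
          (PySem.Str.replace x " " "") []
          = (PySem.Set.ofList done).filter
              (fun n => PySem.Str.replace n " " "" == PySem.Str.replace x " " "") ++ [x] := by
        rw [PySem.Dict.getD_modify, if_pos rfl, hm]
      have hidxx : (PySem.List.index? ((st.2.1.modify (PySem.Str.replace x " " "") [] (· ++ [x])).getD
          (PySem.Str.replace x " " "") []) x).getD 0
          = ((PySem.Set.ofList done).filter
              (fun n => PySem.Str.replace n " " "" == PySem.Str.replace x " " "")).length := by
        rw [hgroup]
        show (List.idxOf? x _).getD 0 = _
        rw [pv_idxOf?_of_mem _ x (by simp)]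
        simp [List.idxOf_append_of_notMem hxnotV]
      have hidxb : (PySem.List.index? ((st.2.1.modify (PySem.Str.replace x " " "") [] (· ++ [x])).getD
          (PySem.Str.replace x " " "") []) b).getD 0
          = ((PySem.Set.ofList done).filter
              (fun n => PySem.Str.replace n " " "" == PySem.Str.replace x " " "")).idxOf b := by
        rw [hgroup]
        show (List.idxOf? b _).getD 0 = _
        rw [pv_idxOf?_of_mem _ b (List.mem_append_left _ hbV)]
        simp [List.idxOf_append_of_mem hbV]
      have hidxblt : ((PySem.Set.ofList done).filter
          (fun n => PySem.Str.replace n " " "" == PySem.Str.replace x " " "")).idxOf b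
          < ((PySem.Set.ofList done).filter
              (fun n => PySem.Str.replace n " " "" == PySem.Str.replace x " " "")).length :=
        List.idxOf_lt_length_of_mem hbV
      rw [hgx, hgv b hbx, hidxx, hidxb]
      rw [if_neg (by
        intro hcond
        rcases hcond with h1 | ⟨h1, h2⟩
        · omega
        · omega)]
      refine ⟨hconj1, hconj2, hmemb, ?_, ?_⟩
      · rw [hk, List.map_append, List.map_singleton, pv_ofList_append_singleton,
          pv_add_of_mem ?mem]
        case mem =>
          by_contra hnot
          have hkeys : PySem.Str.replace x " " "" ∉ st.2.2.keys := by rw [hk]; exact hnot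
          rw [(PySem.Dict.get?_eq_none_iff_not_mem_keys _ _).mpr hkeys] at hg
          simp at hg
      · intro k
        by_cases hkk : k = PySem.Str.replace x " " ""
        · subst hkk
          rw [hg, hS', List.filter_append]
          have hfx : List.filter (fun n => PySem.Str.replace n " " "" == PySem.Str.replace x " " "") [x]
              = [x] := by simp
          rw [hfx]
          symm
          have hndV' : ((PySem.Set.ofList done).filter
              (fun n => PySem.Str.replace n " " "" == PySem.Str.replace x " " "") ++ [x]).Nodup := by
            rw [← hfx, ← List.filter_append, ← hS']
            exact (PySem.Set.nodup_ofList _).filter _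
          apply pv_max?_of_first hndV' (List.mem_append_left _ hbV)
          intro y hy
          rcases List.mem_append.mp hy with hyV | hyx
          · have hyx' : y ≠ x := hynx _ y hyV
            rw [pv_count_snoc, pv_count_snoc, if_neg hyx', if_neg hbx]
            rcases hchar y hyV with hy1 | ⟨hy1, hy2⟩
            · left; omega
            · right
              refine ⟨by omega, ?_⟩
              rw [List.idxOf_append_of_mem hbV, List.idxOf_append_of_mem hyV]
              exact hy2
          · simp only [List.mem_singleton] at hyx
            subst hyx
            rw [pv_count_snoc, pv_count_snoc, if_pos rfl, if_neg hbx, hcnt0]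
            by_cases heq : (0 : Int) + 1 = (List.count b done : Int)
            · right
              refine ⟨by omega, ?_⟩
              rw [List.idxOf_append_of_mem hbV, List.idxOf_append_of_notMem hxnotV]
              simp
              omega
            · left; omega
        · rw [hb k, hcongr k, hVfilter k hkk]

theorem cmInv_fold (rest : List String) : ∀ (done : List String) st,
    cmInv done st → cmInv (done ++ rest) (rest.foldl cmAltStep st) := by
  induction rest with
  | nil => intro done st h; simpa using h
  | cons x rest ih =>
    intro done st h
    have h' := cmInv_step done st x h
    have := ih (done ++ [x]) _ h'
    simpa [List.append_assoc] using this

theorem build_canon_eq (raw : List String) :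
    build_character_canon_map_py raw = build_character_canon_map_py_alt raw := by
  have hinv := cmInv_fold raw [] (PySem.Dict.empty, PySem.Dict.empty, PySem.Dict.empty) cmInv_nil
  rw [List.nil_append] at hinv
  obtain ⟨hc, hn, hm, hk, hb⟩ := hinv
  unfold build_character_canon_map_py build_character_canon_map_py_alt
  simp only [PySem.Dict.keys_counter, PySem.Dict.getD_counter]
  -- A: groups.items is a map over its (nodup) keys, which are the deduped stripped names
  have hnodup : (List.foldl (fun d name => d.modify (PySem.Str.replace name " " "") [] fun x => x ++ [name])
      (PySem.Dict.empty : PySem.Dict String (List String)) (PySem.Set.ofList raw)).keys.Nodup :=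
    PySem.Dict.nodup_keys_foldl_modify_key (PySem.Set.ofList raw)
      (fun n => PySem.Str.replace n " " "") [] (fun _ n => (· ++ [n])) _
      (by simp [PySem.Dict.keys_empty])
  rw [PySem.Dict.items_eq_map_keys _ hnodup []]
  rw [PySem.Dict.keys_foldl_modify_key (PySem.Set.ofList raw)
      (fun n => PySem.Str.replace n " " "") [] (fun _ n => (· ++ [n]))]
  have hupd : PySem.Set.update ((PySem.Dict.empty : PySem.Dict String (List String))).keys
      (List.map (fun n => PySem.Str.replace n " " "") (PySem.Set.ofList raw))
      = PySem.Set.ofList (List.map (fun n => PySem.Str.replace n " " "") (PySem.Set.ofList raw)) := rfl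
  rw [hupd]
  rw [List.foldl_map]
  have hgetD : ∀ k : String,
      ((PySem.Set.ofList raw).foldl (fun d name => d.modify (PySem.Str.replace name " " "") [] (· ++ [name]))
        (PySem.Dict.empty : PySem.Dict String (List String))).getD k []
      = (PySem.Set.ofList raw).filter (fun n => PySem.Str.replace n " " "" == k) := by
    intro k
    have h := PySem.Dict.getD_foldl_modify_append
      ((PySem.Set.ofList raw).map (fun n => (PySem.Str.replace n " " "", n))) PySem.Dict.empty k
    rw [List.foldl_map] at h
    simpa [PySem.Dict.getD_empty, List.filter_map, Function.comp_def] using h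
  simp only [hgetD]
  rw [pv_ofList_map_ofList]
  -- B: best.items is a map over its (nodup) keys, the same deduped stripped names
  have hknd : (List.foldl cmAltStep (PySem.Dict.empty, PySem.Dict.empty, PySem.Dict.empty) raw).2.2.keys.Nodup := by
    rw [hk]; exact PySem.Set.nodup_ofList _
  rw [PySem.Dict.items_eq_map_keys _ hknd ""]
  rw [hk]
  rw [List.foldl_map]
  simp only [hm, hn]
  congr 1
  apply PySem.List.foldl_congr_mem
  intro acc k hkK
  -- k is the stripped form of some raw name n, so its group is nonempty
  obtain ⟨n, hn_raw, hn_key⟩ := List.mem_map.mp ((PySem.Set.mem_ofList _ _).mp hkK)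
  have hnV : n ∈ (PySem.Set.ofList raw).filter (fun m => PySem.Str.replace m " " "" == k) :=
    List.mem_filter.mpr ⟨(PySem.Set.mem_ofList _ _).mpr hn_raw, by simp [hn_key]⟩
  rcases hmaxk : PySem.List.max? ((PySem.Set.ofList raw).filter (fun m => PySem.Str.replace m " " "" == k))
      (fun v => (List.count v raw : Int)) with _ | b
  · exfalso
    have := (PySem.List.max?_eq_none_iff _ _).mp hmaxk
    rw [this] at hnV; cases hnV
  · have hbg : (List.foldl cmAltStep (PySem.Dict.empty, PySem.Dict.empty, PySem.Dict.empty) raw).2.2.getD k "" = b := by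
      rw [PySem.Dict.getD_eq_get?_getD, hb k, hmaxk]; rfl
    rw [hbg]

-- ===== VERDICT (by name: the statement is the Claim_ definition above) =====
theorem build_character_canon_map_py_spec : Claim_equal_build_character_canon_map_py := by
  intro raw_names _
  exact build_canon_eq raw_names
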